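-- pv_equiv track=rewrite | github.com/xy2333/Leetcode | leetcode/2019网易笔试.py | findmineven
-- ===== SOURCE A (Python) =====
-- def findmineven(lst):
-- 	if len(lst) == 0:
-- 		return None,None
-- 	index = mineven = None
-- 	for i in range(len(lst)):
-- 		if lst[i]%2 == 1:
-- 			if mineven is None or mineven > lst[i]:
-- 				mineven = lst[i]
-- 				index = i+1
-- 	return index,mineven
-- ===== SOURCE B (Python) =====
-- def findmineven(lst):
--     odds = sorted(((v, i + 1) for i, v in enumerate(lst) if v % 2 == 1),
--                   key=lambda p: p[0])
--     if not odds: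
--         return None, None
--     return odds[0][1], odds[0][0]
-- ===== Notes on version B (the rewrite author's own statement) =====
-- stated objective: alternative
-- what changed: Replaces A's fused running-min loop with None-state bookkeeping by a staged sort-based algorithm: collect (value, 1-based index) pairs of odd elements, stably sort them by value, and take the first pair (stability preserves A's first-occurrence tie-breaking); trades O(n) for O(n log n).
import Mathlib
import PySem

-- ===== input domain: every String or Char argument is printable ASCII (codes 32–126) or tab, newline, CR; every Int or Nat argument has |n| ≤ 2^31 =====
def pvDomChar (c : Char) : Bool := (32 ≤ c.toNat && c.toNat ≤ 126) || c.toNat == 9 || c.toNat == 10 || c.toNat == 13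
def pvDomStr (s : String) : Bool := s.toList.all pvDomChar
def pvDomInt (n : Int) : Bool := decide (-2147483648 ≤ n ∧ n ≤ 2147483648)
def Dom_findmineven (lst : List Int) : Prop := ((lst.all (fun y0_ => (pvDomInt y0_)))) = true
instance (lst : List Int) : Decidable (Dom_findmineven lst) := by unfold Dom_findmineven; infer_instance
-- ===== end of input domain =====

-- B replaces A's fused running-min loop by a staged algorithm: collect the odd (value, 1-based index)
-- pairs, stably sort them by value, and take the first pair (alternative decomposition; not faster).

-- ===== PORT A =====
-- loop of A: state is (index, mineven); lst[i] is always in range, so pyGetD is exact here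
def findmineven (lst : List Int) : Option Int × Option Int :=
  if PySem.List.len lst = 0 then (none, none)
  else
    (PySem.List.pyRange 0 (PySem.List.len lst) 1).foldl
      (fun st i =>
        let v := PySem.List.pyGetD lst i 0
        if PySem.Int.mod v 2 = 1 then
          match st.2 with
          | none => (some (i + 1), some v)
          | some m => if m > v then (some (i + 1), some v) else st
        else st)
      (none, none)

-- ===== PORT B =====
def findmineven_alt (lst : List Int) : Option Int × Option Int :=
  let odds : List (Int × Int) :=
    PySem.List.sorted
      ((PySem.List.enumerate lst).filterMap
        (fun p => if PySem.Int.mod p.2 2 = 1 then some (p.2, p.1 + 1) else none))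
      (fun p => p.1)
  match odds.head? with            -- 'if not odds … return odds[0][1], odds[0][0]'
  | none => (none, none)
  | some best => (best.2, best.1)

-- ===== PRECONDITION & SPEC =====
def Spec_findmineven (lst : List Int) (out : Option Int × Option Int) : Prop := out = findmineven_alt lst
instance (lst : List Int) (out : Option Int × Option Int) : Decidable (Spec_findmineven lst out) := by unfold Spec_findmineven; infer_instance

-- ===== CLAIM (what is proved, stated in full; the proofs are below) =====
def Claim_equal_findmineven : Prop := ∀ (lst : List Int), Dom_findmineven lst → Spec_findmineven lst (findmineven lst)

-- ===== LEMMAS AND PROOFS =====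

-- A's loop body, named for the proofs
def pvStepA (lst : List Int) (st : Option Int × Option Int) (i : Int) : Option Int × Option Int :=
  let v := PySem.List.pyGetD lst i 0
  if PySem.Int.mod v 2 = 1 then
    match st.2 with
    | none => (some (i + 1), some v)
    | some m => if m > v then (some (i + 1), some v) else st
  else st

-- the running-first-minimum step on (value, index) pairs, compared by value
def pvMinStep (acc : Option (Int × Int)) (x : Int × Int) : Option (Int × Int) :=
  match acc with
  | none => some x
  | some m => if x.1 < m.1 then some x else some m

-- A's step fused with the odd-filter on the enumerated indices
def pvStepB (lst : List Int) (acc : Option (Int × Int)) (i : Int) : Option (Int × Int) :=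
  if PySem.Int.mod (PySem.List.pyGetD lst i 0) 2 = 1 then
    pvMinStep acc (PySem.List.pyGetD lst i 0, i + 1)
  else acc

-- view of the running-minimum accumulator as A's loop state
def pvView (acc : Option (Int × Int)) : Option Int × Option Int :=
  (acc.map (·.2), acc.map (·.1))

theorem pv_step (lst : List Int) (acc : Option (Int × Int)) (i : Int) :
    pvStepA lst (pvView acc) i = pvView (pvStepB lst acc i) := by
  by_cases hodd : PySem.Int.mod (PySem.List.pyGetD lst i 0) 2 = 1
  · cases acc with
    | none =>
      simp only [pvStepA, pvStepB, pvMinStep, pvView, if_pos hodd, Option.map_none,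
        Option.map_some]
    | some m =>
      by_cases hlt : PySem.List.pyGetD lst i 0 < m.1
      · simp only [pvStepA, pvStepB, pvMinStep, pvView, if_pos hodd, Option.map_some,
          gt_iff_lt, if_pos hlt]
      · simp only [pvStepA, pvStepB, pvMinStep, pvView, if_pos hodd, Option.map_some,
          gt_iff_lt, if_neg hlt]
  · cases acc <;>
      simp only [pvStepA, pvStepB, pvView, if_neg hodd, Option.map_none, Option.map_some]

theorem pv_loop (lst : List Int) (l : List Int) (acc : Option (Int × Int)) :
    l.foldl (pvStepA lst) (pvView acc) = pvView (l.foldl (pvStepB lst) acc) := by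
  induction l generalizing acc with
  | nil => rfl
  | cons i t ih => rw [List.foldl_cons, List.foldl_cons, pv_step]; exact ih _

-- the head of a stable insertion of x: x wins iff its key is strictly smaller
theorem pv_head_insertBy (x : Int × Int) (acc : List (Int × Int)) :
    (PySem.List.insertBy (fun a b => decide (a.1 < b.1)) x acc).head?
      = pvMinStep acc.head? x := by
  cases acc with
  | nil => rfl
  | cons y ys =>
    by_cases h : x.1 < y.1
    · simp [PySem.List.insertBy, h, pvMinStep]
    · simp [PySem.List.insertBy, h, pvMinStep]

-- head of the stable-insertion-sort fold = running first-minimum fold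
theorem pv_head_sort_fold (l : List (Int × Int)) (acc : List (Int × Int)) :
    (l.foldl (fun acc x => PySem.List.insertBy (fun a b => decide (a.1 < b.1)) x acc) acc).head?
      = l.foldl pvMinStep acc.head? := by
  induction l generalizing acc with
  | nil => rfl
  | cons x t ih =>
    rw [List.foldl_cons, List.foldl_cons, ih, pv_head_insertBy]

-- head of the stable sort by value = first minimal element (PySem.List.min?)
theorem pv_head_sorted (l : List (Int × Int)) :
    (PySem.List.sorted l (fun p => p.1)).head? = PySem.List.min? l (fun p => p.1) := by
  rw [PySem.List.sorted_eq_foldl_insertBy, pv_head_sort_fold l []]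
  show List.foldl pvMinStep none l = _
  unfold PySem.List.min? pvMinStep
  congr 1
  funext acc x
  cases acc <;> rfl

theorem pv_alt_eq (lst : List Int) :
    findmineven_alt lst
      = pvView ((PySem.List.pyRange 0 (PySem.List.len lst) 1).foldl (pvStepB lst) none) := by
  have hm : ∀ r : Option (Int × Int), (match r with
      | none => ((none : Option Int), (none : Option Int))
      | some best => (some best.2, some best.1)) = pvView r := by
    intro r; cases r <;> rfl
  show (match (PySem.List.sorted ((PySem.List.enumerate lst).filterMap
      (fun p : Int × Int => if PySem.Int.mod p.2 2 = 1 then some (p.2, p.1 + 1) else none))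
      (fun p : Int × Int => p.1)).head? with
    | none => ((none : Option Int), (none : Option Int))
    | some best => (some best.2, some best.1)) = _
  rw [pv_head_sorted, hm]
  congr 1
  rw [PySem.List.enumerate_eq_map_pyRange (d := 0), List.filterMap_map]
  unfold PySem.List.min?
  rw [List.foldl_filterMap]
  congr 1
  funext x y
  by_cases h : PySem.Int.mod (PySem.List.pyGetD lst y 0) 2 = 1
  · simp only [Function.comp_apply, if_pos h, pvStepB, pvMinStep]
    cases x <;> rfl
  · simp only [Function.comp_apply, if_neg h, pvStepB]

-- ===== VERDICT (by name: the statement is the Claim_ definition above) =====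
theorem findmineven_spec : Claim_equal_findmineven := by
  intro lst _
  show findmineven lst = findmineven_alt lst
  rw [pv_alt_eq]
  unfold findmineven
  by_cases h : PySem.List.len lst = 0
  · have hnil : lst = [] := by simpa [PySem.List.len_eq] using h
    subst hnil
    rfl
  · rw [if_neg h]
    exact pv_loop lst (PySem.List.pyRange 0 (PySem.List.len lst) 1) none
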